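-- pv_equiv track=rewrite | github.com/fbkarsdorp/deepflow-analysis | data/preprocess.py | group_syllables
-- ===== SOURCE A (Python) =====
-- def group_syllables(line):
--     words = []
--     for syllable in line:
--         if syllable.startswith("-"):
--             if not words:
--                 words.append([])
--             words[-1].append(syllable)
--         else:
--             words.append([syllable])
--     return words
-- ===== SOURCE B (Python) =====
-- def group_syllables(line):
--     # pass 1: label each syllable with a group id (counter bumps on non-'-' syllables)
--     labels = []
--     k = 0
--     for s in line:
--         if not s.startswith("-"):
--             k += 1
--         labels.append(k)
--     # pass 2: bucket consecutive syllables sharing a label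
--     out = []
--     prev = None
--     for lab, s in zip(labels, line):
--         if lab != prev:
--             out.append([])
--             prev = lab
--         out[-1].append(s)
--     return out
-- ===== Notes on version B (the rewrite author's own statement) =====
-- stated objective: alternative
-- what changed: B first computes a group-id label for every syllable with a running counter, then buckets consecutive equal labels in a second pass, instead of A's single per-element append-or-new-word branching on the accumulator's emptiness.
import Mathlib
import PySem

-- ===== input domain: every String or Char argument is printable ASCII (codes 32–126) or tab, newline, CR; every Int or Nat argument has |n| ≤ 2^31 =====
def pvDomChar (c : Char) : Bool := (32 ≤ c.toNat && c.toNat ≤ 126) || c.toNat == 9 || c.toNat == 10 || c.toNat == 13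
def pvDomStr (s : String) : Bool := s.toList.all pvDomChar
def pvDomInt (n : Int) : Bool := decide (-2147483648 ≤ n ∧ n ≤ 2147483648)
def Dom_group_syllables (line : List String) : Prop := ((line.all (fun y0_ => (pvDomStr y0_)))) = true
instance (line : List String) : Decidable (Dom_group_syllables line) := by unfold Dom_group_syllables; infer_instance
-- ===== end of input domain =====

-- B labels every syllable with a running group id in one pass and then buckets consecutive
-- equal labels in a second pass, instead of A's per-element append-or-new-word branching;
-- same cost, different decomposition. (A mutates its accumulator lists in place in Python;
-- the return value is what is compared.)


-- ===== PORT A =====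
-- one step of A's for-loop: append to the last word, or start a new word
def gsStepA (words : List (List String)) (syllable : String) : List (List String) :=
  if PySem.Str.startswith syllable "-" then
    if words = [] then [[syllable]]
    else words.dropLast ++ [words.getLast! ++ [syllable]]
  else words ++ [[syllable]]

def group_syllables (line : List String) : List (List String) :=
  line.foldl gsStepA []

-- ===== PORT B =====
-- pass 1 of Source B: running-counter labels (state = (labels so far, k))
def gsLabels (line : List String) : List Nat :=
  (line.foldl
    (fun (acc : List Nat × Nat) s =>
      let k := if PySem.Str.startswith s "-" then acc.2 else acc.2 + 1
      (acc.1 ++ [k], k))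
    ([], 0)).1

-- pass 2 of Source B: bucket consecutive equal labels (state = (out, prev))
def gsStepB (st : List (List String) × Option Nat) (p : Nat × String) : List (List String) × Option Nat :=
  if some p.1 ≠ st.2 then (st.1 ++ [[p.2]], some p.1)
  else (st.1.dropLast ++ [st.1.getLast! ++ [p.2]], st.2)

def group_syllables_alt (line : List String) : List (List String) :=
  ((List.zip (gsLabels line) line).foldl gsStepB ([], none)).1

-- ===== PRECONDITION & SPEC =====
def Spec_group_syllables (line : List String) (out : List (List String)) : Prop := out = group_syllables_alt line
instance (line : List String) (out : List (List String)) : Decidable (Spec_group_syllables line out) := by unfold Spec_group_syllables; infer_instance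

-- ===== CLAIM (what is proved, stated in full; the proofs are below) =====
def Claim_equal_group_syllables : Prop := ∀ (line : List String), Dom_group_syllables line → Spec_group_syllables line (group_syllables line)

-- ===== LEMMAS AND PROOFS =====

-- recursive characterisation of pass-1's label stream from counter k
def gsLabelsFrom (k : Nat) (l : List String) : List Nat :=
  match l with
  | [] => []
  | s :: t =>
    let k' := if PySem.Str.startswith s "-" then k else k + 1
    k' :: gsLabelsFrom k' t

theorem gsLabels_fold (l : List String) (acc : List Nat) (k : Nat) :
    (l.foldl
      (fun (acc : List Nat × Nat) s =>
        let k := if PySem.Str.startswith s "-" then acc.2 else acc.2 + 1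
        (acc.1 ++ [k], k))
      (acc, k)).1 = acc ++ gsLabelsFrom k l := by
  induction l generalizing acc k with
  | nil => simp [gsLabelsFrom]
  | cons s t ih =>
    simp only [List.foldl, gsLabelsFrom]
    rw [ih]
    simp

theorem gsLabels_eq (line : List String) : gsLabels line = gsLabelsFrom 0 line := by
  unfold gsLabels
  rw [gsLabels_fold]
  simp

-- A's loop state agrees with B's bucketing pass: prev = none iff words = [], else prev = some k
theorem gs_main (l : List String) (k : Nat) (words : List (List String)) :
    l.foldl gsStepA words
      = ((List.zip (gsLabelsFrom k l) l).foldl gsStepB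
          (words, if words = [] then none else some k)).1 := by
  induction l generalizing k words with
  | nil => simp
  | cons s t ih =>
    by_cases hst : PySem.Chars.startswith s.toList ['-'] = true
    · by_cases hw : words = []
      · subst hw
        simp [gsLabelsFrom, gsStepA, gsStepB, hst]
        rw [ih k [[s]]]
        simp
      · simp [gsLabelsFrom, gsStepA, gsStepB, hst, hw]
        rw [ih k (words.dropLast ++ [words.getLast?.getD default ++ [s]])]
        simp
    · by_cases hw : words = []
      · subst hw
        simp [gsLabelsFrom, gsStepA, gsStepB, hst]
        rw [ih (k + 1) [[s]]]
        simp
      · simp [gsLabelsFrom, gsStepA, gsStepB, hst, hw]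
        rw [ih (k + 1) (words ++ [[s]])]
        simp

-- ===== VERDICT (by name: the statement is the Claim_ definition above) =====
theorem group_syllables_spec : Claim_equal_group_syllables := by
  intro line _
  unfold Spec_group_syllables group_syllables group_syllables_alt
  rw [gsLabels_eq]
  exact gs_main line 0 []
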